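-- pv_equiv track=rewrite | github.com/andrebarsotti/csv-to-ofx-converter | src/gui_utils.py | format_date_string
-- ===== SOURCE A (Python) =====
-- def format_date_string(input_string: str, max_length: int = 10) -> str:
--     """
--     Format a date input string by removing non-digit characters except slashes.
--
--     Auto-formats in DD/MM/YYYY format.
--
--     Args:
--         input_string: Input string to format
--         max_length: Maximum length of formatted string (default 10 for DD/MM/YYYY)
--
--     Returns:
--         Formatted date string
--     """
--     # Remove any non-digit, non-slash characters
--     digits_only = ''.join(c for c in input_string if c.isdigit())
--
--     # Limit to 8 digits (DDMMYYYY)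
--     digits_only = digits_only[:8]
--
--     # Build formatted string based on number of digits
--     # DD/MM/YYYY format
--     if len(digits_only) <= 2:
--         # Just day digits
--         formatted = digits_only
--     elif len(digits_only) <= 4:
--         # Day + month digits
--         formatted = digits_only[:2] + '/' + digits_only[2:]
--     else:
--         # Day + month + year digits
--         formatted = digits_only[:2] + '/' + digits_only[2:4] + '/' + digits_only[4:]
--
--     return formatted[:max_length]
-- ===== SOURCE B (Python) =====
-- def format_date_string(input_string: str, max_length: int = 10) -> str:
--     # Single pass over the raw input: emit digits as they are found, inserting a
--     # '/' before the 3rd and 5th digit, and stop after 8 digits; no intermediate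
--     # digit string, no slicing of it.
--     out = []
--     n = 0
--     for c in input_string:
--         if c.isdigit():
--             if n == 8:
--                 break
--             if n == 2 or n == 4:
--                 out.append('/')
--             out.append(c)
--             n += 1
--     return ''.join(out)[:max_length]
-- ===== Notes on version B (the rewrite author's own statement) =====
-- stated objective: alternative
-- what changed: Replaces A's staged passes (filter all digits into an intermediate string, cap at 8, branch on its length, concatenate slices) with one streaming pass over the raw input that emits each digit directly with separators inserted before the 3rd and 5th digit and breaks after 8 digits.
import Mathlib
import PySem

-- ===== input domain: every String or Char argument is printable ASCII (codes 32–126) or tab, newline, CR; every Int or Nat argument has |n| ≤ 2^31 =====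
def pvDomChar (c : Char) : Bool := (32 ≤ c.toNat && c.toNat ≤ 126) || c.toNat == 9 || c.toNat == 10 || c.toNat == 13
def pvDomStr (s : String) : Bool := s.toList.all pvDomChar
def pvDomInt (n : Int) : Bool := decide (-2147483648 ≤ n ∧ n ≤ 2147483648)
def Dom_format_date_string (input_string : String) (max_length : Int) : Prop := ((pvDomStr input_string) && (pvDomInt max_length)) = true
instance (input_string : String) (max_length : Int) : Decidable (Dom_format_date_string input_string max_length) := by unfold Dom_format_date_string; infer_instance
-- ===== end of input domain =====

-- B replaces A's staged passes (filter digits, cap at 8, branch on length, concatenate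
-- slices) with one streaming pass over the raw input inserting '/' before the 3rd and
-- 5th digit and breaking after 8 digits; objective: alternative.

-- ===== PORT A =====
def format_date_string (input_string : String) (max_length : Int) : String :=
  let digits_only := input_string.toList.filter PySem.Chars.isdigit
  let digits_only := PySem.List.slice digits_only none (some 8)
  let formatted :=
    if digits_only.length ≤ 2 then digits_only
    else if digits_only.length ≤ 4 then
      PySem.List.slice digits_only none (some 2) ++ ['/'] ++
        PySem.List.slice digits_only (some 2) none
    else
      PySem.List.slice digits_only none (some 2) ++ ['/'] ++
        PySem.List.slice digits_only (some 2) (some 4) ++ ['/'] ++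
        PySem.List.slice digits_only (some 4) none
  String.ofList (PySem.List.slice formatted none (some max_length))

-- ===== PORT B =====
-- B's loop: state (out, n); on a digit, break at n = 8, else prepend '/' before
-- the 3rd and 5th digit, append the digit, count it.
def fdsAltLoop : List Char → List Char → Nat → List Char
  | [], out, _ => out
  | c :: cs, out, n =>
    if PySem.Chars.isdigit c then
      if n == 8 then out
      else fdsAltLoop cs (out ++ (if n == 2 || n == 4 then ['/'] else []) ++ [c]) (n + 1)
    else fdsAltLoop cs out n

def format_date_string_alt (input_string : String) (max_length : Int) : String :=
  String.ofList (PySem.List.slice (fdsAltLoop input_string.toList [] 0) none (some max_length))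

-- ===== PRECONDITION & SPEC =====
def Spec_format_date_string (input_string : String) (max_length : Int) (out : String) : Prop := out = format_date_string_alt input_string max_length
instance (input_string : String) (max_length : Int) (out : String) : Decidable (Spec_format_date_string input_string max_length out) := by unfold Spec_format_date_string; infer_instance

-- ===== CLAIM (what is proved, stated in full; the proofs are below) =====
def Claim_equal_format_date_string : Prop := ∀ (input_string : String) (max_length : Int), Dom_format_date_string input_string max_length → Spec_format_date_string input_string max_length (format_date_string input_string max_length)

-- ===== LEMMAS AND PROOFS =====

-- Pure formatting of a digit list starting from digit position n (no cap: the
-- caller caps with take).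
def fdsBuild : Nat → List Char → List Char
  | _, [] => []
  | n, c :: cs => (if n == 2 || n == 4 then ['/'] else []) ++ c :: fdsBuild (n + 1) cs

-- B's loop = append of the formatted capped filtered tail.
theorem fdsAltLoop_eq (cs : List Char) : ∀ (out : List Char) (n : Nat), n ≤ 8 →
    fdsAltLoop cs out n = out ++ fdsBuild n ((cs.filter PySem.Chars.isdigit).take (8 - n)) := by
  induction cs with
  | nil => intro out n _; simp [fdsAltLoop, fdsBuild]
  | cons c cs ih =>
    intro out n hn
    by_cases hd : PySem.Chars.isdigit c
    · by_cases h8 : n = 8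
      · simp [fdsAltLoop, hd, h8, fdsBuild]
      · have h18 : 8 - n = (8 - (n + 1)) + 1 := by omega
        simp only [fdsAltLoop, hd, if_true, h8, beq_iff_eq,
          List.filter_cons_of_pos hd, h18, List.take_succ_cons, ih _ (n + 1) (by omega)]
        simp [fdsBuild]
    · simp [fdsAltLoop, hd, List.filter_cons_of_neg hd, ih _ n hn]

-- A's branch-built string on a ≤ 8 digit list equals fdsBuild 0.
theorem fdsCore (d : List Char) (h : d.length ≤ 8) :
    (if d.length ≤ 2 then d
     else if d.length ≤ 4 then
       PySem.List.slice d none (some 2) ++ ['/'] ++ PySem.List.slice d (some 2) none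
     else
       PySem.List.slice d none (some 2) ++ ['/'] ++ PySem.List.slice d (some 2) (some 4)
         ++ ['/'] ++ PySem.List.slice d (some 4) none)
    = fdsBuild 0 d := by
  rcases d with _|⟨a,_|⟨b,_|⟨c,_|⟨e,_|⟨f,_|⟨g,_|⟨i,_|⟨j,_|⟨k,l⟩⟩⟩⟩⟩⟩⟩⟩⟩ <;>
    (simp_all [PySem.List.slice, PySem.List.clampIdx, fdsBuild]; try omega)

-- ===== VERDICT (by name: the statement is the Claim_ definition above) =====
theorem format_date_string_spec : Claim_equal_format_date_string := by
  intro s m _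
  unfold Spec_format_date_string format_date_string format_date_string_alt
  simp only
  rw [fdsAltLoop_eq _ _ _ (by omega), List.nil_append]
  have h8 : PySem.List.slice (s.toList.filter PySem.Chars.isdigit) none (some 8)
      = (s.toList.filter PySem.Chars.isdigit).take 8 :=
    PySem.List.slice_to_natCast (s.toList.filter PySem.Chars.isdigit) 8
  rw [h8, fdsCore _ (by simpa using List.length_take_le 8 _)]
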